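-- pv_equiv track=rewrite | github.com/linacastaneda/AFD | AFD.py | procesar_cadena
-- ===== SOURCE A (Python) =====
-- ESTADOS_FINALES = {"q2"}
--
-- def transicion(estado, simbolo):
--     #Estado = estado actual"
--     #simbolo = simbolo leido de la cadena "
--     if estado == "q1":  # inicial
--         if simbolo == "0":
--             return "q2"
--         elif simbolo == "1":
--             return "q3"
--     elif estado == "q2": # aceptacion
--         if simbolo in {"0", "1"}:
--             return "q2"
--     elif estado == "q3": # rechazo
--         if simbolo in {"0", "1"}:
--             return "q3"
--     return None # si no existe transicion valida
--
-- def procesar_cadena(cadena): # cadena entrada binaria retorna bool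
--     estado_actual = "q1"
--     for simbolo in cadena.strip(): #recorre cada simbolo de cadena .strip() es .strip() elimina espacios en blanco al inicio y al final de un texto.
--         if simbolo not in {"0", "1"}:#verifica que el simbolo este en el alfabeto 0,1
--             return False
--         estado_siguiente = transicion(estado_actual, simbolo) #aplica la funcion de transicion
--         if estado_siguiente is None: #si no existe transicion la rechaza
--             return False
--         estado_actual = estado_siguiente #actualiza el estado actual
--     return estado_actual in ESTADOS_FINALES
-- ===== SOURCE B (Python) =====
-- def procesar_cadena(cadena):
--     s = cadena.strip()
--     if not all(c in "01" for c in s):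
--         return False
--     return s[:1] == "0"
-- ===== Notes on version B (the rewrite author's own statement) =====
-- stated objective: simpler
-- what changed: Replaced the explicit DFA state machine and transition table by a single validation pass (all characters binary) plus a closed-form first-character test, since q2/q3 are sink states determined by the first symbol.
import Mathlib
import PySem

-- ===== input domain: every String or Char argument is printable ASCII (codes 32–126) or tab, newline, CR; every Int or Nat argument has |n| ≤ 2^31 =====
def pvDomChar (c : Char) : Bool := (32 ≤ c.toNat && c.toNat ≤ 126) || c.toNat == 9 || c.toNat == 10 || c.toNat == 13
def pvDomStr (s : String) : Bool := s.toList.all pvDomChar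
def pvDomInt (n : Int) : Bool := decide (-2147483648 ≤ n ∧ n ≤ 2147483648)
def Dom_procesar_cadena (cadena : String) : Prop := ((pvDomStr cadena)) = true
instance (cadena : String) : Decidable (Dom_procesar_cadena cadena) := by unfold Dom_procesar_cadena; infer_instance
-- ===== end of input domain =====

-- B replaces A's DFA simulation by a validation scan plus a first-character test (objective: simpler).

-- ===== PORT A =====
-- transicion(estado, simbolo): simbolo is a single character, ported as Char
def transicion (estado : String) (simbolo : Char) : Option String :=
  if estado == "q1" then
    if simbolo == '0' then some "q2"
    else if simbolo == '1' then some "q3"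
    else none
  else if estado == "q2" then
    if simbolo == '0' || simbolo == '1' then some "q2" else none
  else if estado == "q3" then
    if simbolo == '0' || simbolo == '1' then some "q3" else none
  else none

-- the for-loop over cadena.strip() with early returns, as structural recursion on the chars
def procesarLoop : List Char → String → Bool
  | [], estado => estado == "q2"
  | simbolo :: rest, estado =>
    if !(simbolo == '0' || simbolo == '1') then false
    else
      match transicion estado simbolo with
      | none => false
      | some estado' => procesarLoop rest estado'

def procesar_cadena (cadena : String) : Bool :=
  procesarLoop (PySem.Str.strip cadena).toList "q1"

-- ===== PORT B =====
def procesar_cadena_alt (cadena : String) : Bool :=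
  let s := (PySem.Str.strip cadena).toList
  if !(s.all (fun c => c == '0' || c == '1')) then false
  else PySem.Chars.slice s none (some 1) == ['0']

-- ===== PRECONDITION & SPEC =====
def Spec_procesar_cadena (cadena : String) (out : Bool) : Prop := out = procesar_cadena_alt cadena
instance (cadena : String) (out : Bool) : Decidable (Spec_procesar_cadena cadena out) := by unfold Spec_procesar_cadena; infer_instance

-- ===== CLAIM (what is proved, stated in full; the proofs are below) =====
def Claim_equal_procesar_cadena : Prop := ∀ (cadena : String), Dom_procesar_cadena cadena → Spec_procesar_cadena cadena (procesar_cadena cadena)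

-- ===== LEMMAS AND PROOFS =====

lemma loop_q3 (l : List Char) : procesarLoop l "q3" = false := by
  induction l with
  | nil => decide
  | cons c rest ih =>
    simp only [procesarLoop, transicion]
    by_cases h0 : c = '0' <;> by_cases h1 : c = '1' <;> simp [h0, h1, ih]

lemma loop_q2 (l : List Char) :
    procesarLoop l "q2" = l.all (fun c => c == '0' || c == '1') := by
  induction l with
  | nil => decide
  | cons c rest ih =>
    simp only [procesarLoop, transicion]
    by_cases h0 : c = '0' <;> by_cases h1 : c = '1' <;> simp [h0, h1, ih]

lemma loop_q1 (l : List Char) :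
    procesarLoop l "q1" =
      (l.all (fun c => c == '0' || c == '1') &&
        (PySem.Chars.slice l none (some 1) == ['0'])) := by
  cases l with
  | nil => decide
  | cons c rest =>
    simp only [procesarLoop, transicion]
    by_cases h0 : c = '0'
    · simp [h0, loop_q2, PySem.Chars.slice]
      intro _; rfl
    · by_cases h1 : c = '1'
      · simp [h1, loop_q3, PySem.List.slice]
      · simp [h0, h1]

-- ===== VERDICT (by name: the statement is the Claim_ definition above) =====
theorem procesar_cadena_spec : Claim_equal_procesar_cadena := by
  intro cadena _
  unfold Spec_procesar_cadena procesar_cadena procesar_cadena_alt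
  simp only [PySem.Str.toList_strip, loop_q1]
  cases h : (PySem.Chars.strip cadena.toList).all (fun c => c == '0' || c == '1') <;> simp [h]
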